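-- pv_equiv track=rewrite | github.com/pieter98/log_data_analysis | utils.py | normalize_session_id_list
-- ===== SOURCE A (Python) =====
-- def normalize_session_id_list(session_id_list):
--     nr_of_mappings = 0
--     id_mapping = {}
--     normalized_session_ids = []
--     for session_id in session_id_list:
--         if session_id not in id_mapping:
--             id_mapping[session_id] = nr_of_mappings
--             nr_of_mappings += 1
--         normalized_session_ids.append(id_mapping[session_id])
--     return normalized_session_ids
-- ===== SOURCE B (Python) =====
-- def normalize_session_id_list(session_id_list):
--     n = len(session_id_list)
--     # indices sorted by value: equal values become contiguous runs
--     order = sorted(range(n), key=lambda i: session_id_list[i])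
--     # cut the sorted index list into runs of equal value
--     groups = []
--     current = []
--     for i in order:
--         if current and session_id_list[current[0]] == session_id_list[i]:
--             current.append(i)
--         else:
--             if current:
--                 groups.append(current)
--             current = [i]
--     if current:
--         groups.append(current)
--     # order the runs by their smallest index = the value's first occurrence
--     groups.sort(key=min)
--     # scatter each run's rank to the positions it covers
--     out = [0] * n
--     for r, g in enumerate(groups):
--         for j in g:
--             out[j] = r
--     return out
-- ===== Notes on version B (the rewrite author's own statement) =====
-- stated objective: alternative
-- what changed: A's single fused pass with an incremental value-to-rank dictionary is replaced by a sort-based algorithm with no dictionary at all: sort the indices by value, cut the sorted index list into runs of equal value, order the runs by their smallest index (the value's first occurrence) and scatter each run's rank into a preallocated output list.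
import Mathlib
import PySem

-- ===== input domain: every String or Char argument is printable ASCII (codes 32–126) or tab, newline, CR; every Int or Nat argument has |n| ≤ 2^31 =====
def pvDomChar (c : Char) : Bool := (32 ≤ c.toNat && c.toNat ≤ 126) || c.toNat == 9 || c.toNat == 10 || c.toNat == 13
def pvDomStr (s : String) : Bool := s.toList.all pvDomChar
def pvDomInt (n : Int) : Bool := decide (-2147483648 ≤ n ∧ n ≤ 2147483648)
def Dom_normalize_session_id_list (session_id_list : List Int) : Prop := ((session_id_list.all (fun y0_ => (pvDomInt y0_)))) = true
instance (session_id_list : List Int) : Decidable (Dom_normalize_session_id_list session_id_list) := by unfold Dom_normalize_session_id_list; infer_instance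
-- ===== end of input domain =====

-- B replaces A's incremental value→rank dictionary by a sort-based algorithm:
-- sort the indices by value, cut the sorted index list into runs of equal value,
-- order the runs by their smallest index (the value's first occurrence) and
-- scatter each run's rank into a preallocated output list; objective: alternative.

-- ===== PORT A =====
-- loop body: state = (nr_of_mappings, id_mapping, normalized_session_ids)
def nsidStepA (st : Int × PySem.Dict Int Int × List Int) (sid : Int) :
    Int × PySem.Dict Int Int × List Int :=
  if st.2.1.contains sid then            -- 'session_id not in id_mapping' is False
    (st.1, st.2.1, st.2.2 ++ [st.2.1.getD sid 0])
  else
    let m := st.2.1.insert sid st.1      -- id_mapping[session_id] = nr_of_mappings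
    (st.1 + 1, m, st.2.2 ++ [m.getD sid 0])

def normalize_session_id_list (session_id_list : List Int) : List Int :=
  (session_id_list.foldl nsidStepA (0, PySem.Dict.empty, [])).2.2

-- ===== PORT B =====
-- run-cutting loop body: state = (groups, current)
def nsidGroupStep (l : List Int) (st : List (List Int) × List Int) (i : Int) :
    List (List Int) × List Int :=
  if !st.2.isEmpty && (PySem.List.pyGetD l (PySem.List.pyGetD st.2 0 0) 0
                        == PySem.List.pyGetD l i 0) then
    (st.1, st.2 ++ [i])                                     -- current.append(i)
  else
    ((if st.2.isEmpty then st.1 else st.1 ++ [st.2]), [i])  -- close current, open [i]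

def normalize_session_id_list_alt (session_id_list : List Int) : List Int :=
  let n : Int := session_id_list.length
  -- order = sorted(range(n), key=lambda i: session_id_list[i])
  let order := PySem.List.sorted (PySem.List.pyRange 0 n 1)
                 (fun i => PySem.List.pyGetD session_id_list i 0) false
  let st := order.foldl (nsidGroupStep session_id_list) ([], [])
  let groups := if st.2.isEmpty then st.1 else st.1 ++ [st.2]   -- trailing 'if current'
  -- groups.sort(key=min)
  let groups2 := PySem.List.sorted groups
                   (fun g => (PySem.List.min? g (fun x => x)).getD 0) false
  -- out = [0] * n;  for r, g in enumerate(groups2): for j in g: out[j] = r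
  let out0 := PySem.List.pyRepeat ([0] : List Int) n
  (PySem.List.enumerate groups2 0).foldl
    (fun out p => p.2.foldl (fun out j => PySem.List.pySetD out j p.1) out) out0

-- ===== PRECONDITION & SPEC =====
def Spec_normalize_session_id_list (session_id_list : List Int) (out : List Int) : Prop := out = normalize_session_id_list_alt session_id_list
instance (session_id_list : List Int) (out : List Int) : Decidable (Spec_normalize_session_id_list session_id_list out) := by unfold Spec_normalize_session_id_list; infer_instance

-- ===== CLAIM (what is proved, stated in full; the proofs are below) =====
def Claim_equal_normalize_session_id_list : Prop := ∀ (session_id_list : List Int), Dom_normalize_session_id_list session_id_list → Spec_normalize_session_id_list session_id_list (normalize_session_id_list session_id_list)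

-- ===== LEMMAS AND PROOFS =====

-- ---------- A-side (invariant: the dict realizes the rank function of the seen list) ----------
lemma setAdd_eq (s : List Int) (x : Int) :
    PySem.Set.add s x = if x ∈ s then s else s ++ [x] := by
  simp [PySem.Set.add, PySem.Set.contains]

lemma foldl_add_prefix (l : List Int) : ∀ (s : List Int),
    ∃ t, l.foldl PySem.Set.add s = s ++ t := by
  induction l with
  | nil => exact fun s => ⟨[], by simp⟩
  | cons x l ih =>
    intro s
    rcases ih (PySem.Set.add s x) with ⟨t, ht⟩
    rw [List.foldl_cons, ht, setAdd_eq]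
    by_cases hx : x ∈ s
    · exact ⟨t, by simp [hx]⟩
    · exact ⟨x :: t, by simp [hx]⟩

lemma loopA (rest : List Int) : ∀ (seen : List Int) (m : PySem.Dict Int Int) (out : List Int),
    seen.Nodup →
    (∀ k, m.contains k = decide (k ∈ seen)) →
    (∀ k, k ∈ seen → m.getD k 0 = (List.idxOf k seen : Int)) →
    (rest.foldl nsidStepA ((seen.length : Int), m, out)).2.2
      = out ++ rest.map (fun s => ((List.idxOf s (rest.foldl PySem.Set.add seen) : Nat) : Int)) := by
  induction rest with
  | nil => intro seen m out _ _ _; simp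
  | cons x rest ih =>
    intro seen m out hnd hc hg
    rw [List.foldl_cons, List.foldl_cons]
    by_cases hx : x ∈ seen
    · have hstep : nsidStepA ((seen.length : Int), m, out) x
          = ((seen.length : Int), m, out ++ [m.getD x 0]) := by
        simp [nsidStepA, hc x, hx]
      rw [hstep, setAdd_eq, if_pos hx, ih seen m _ hnd hc hg]
      rcases foldl_add_prefix rest seen with ⟨t, ht⟩
      have hidx : List.idxOf x (rest.foldl PySem.Set.add seen) = List.idxOf x seen := by
        rw [ht]; exact List.idxOf_append_of_mem hx
      simp [hg x hx, hidx]
    · have hstep : nsidStepA ((seen.length : Int), m, out) x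
          = ((seen.length : Int) + 1, m.insert x (seen.length : Int),
             out ++ [(seen.length : Int)]) := by
        simp [nsidStepA, hc x, hx, PySem.Dict.getD_insert_self]
      rw [hstep, setAdd_eq, if_neg hx]
      have hnd' : (seen ++ [x]).Nodup := by
        rw [List.nodup_append]
        refine ⟨hnd, List.nodup_singleton x, ?_⟩
        intro a ha b hb h
        subst h
        exact hx ((List.mem_singleton.mp hb) ▸ ha)
      have hidxx : List.idxOf x (seen ++ [x]) = seen.length := by
        rw [List.idxOf_append, if_neg hx]; simp
      have hc' : ∀ k, (m.insert x (seen.length : Int)).contains k = decide (k ∈ seen ++ [x]) := by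
        intro k
        rw [PySem.Dict.contains_insert, hc k]
        by_cases hkx : k = x <;> simp [hkx]
      have hg' : ∀ k, k ∈ seen ++ [x] →
          (m.insert x (seen.length : Int)).getD k 0 = (List.idxOf k (seen ++ [x]) : Int) := by
        intro k hk
        by_cases hkx : k = x
        · subst hkx; rw [PySem.Dict.getD_insert_self, hidxx]
        · have hks : k ∈ seen := by
            rcases List.mem_append.mp hk with h | h
            · exact h
            · exact absurd (List.mem_singleton.mp h) hkx
          rw [PySem.Dict.getD_insert_of_ne _ _ _ hkx, hg k hks,
              List.idxOf_append_of_mem hks]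
      have hlen : ((seen ++ [x]).length : Int) = (seen.length : Int) + 1 := by
        simp
      rw [← hlen, ih (seen ++ [x]) _ _ hnd' hc' hg']
      rcases foldl_add_prefix rest (seen ++ [x]) with ⟨t, ht⟩
      have hidx : List.idxOf x (rest.foldl PySem.Set.add (seen ++ [x])) = seen.length := by
        rw [ht, List.idxOf_append_of_mem (by simp), hidxx]
      simp [hidx]

lemma sideA (l : List Int) :
    normalize_session_id_list l
      = l.map (fun s => ((List.idxOf s (PySem.List.dedup l) : Nat) : Int)) := by
  unfold normalize_session_id_list
  have hA := loopA l [] PySem.Dict.empty [] List.nodup_nil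
    (fun k => by simp [PySem.Dict.contains_empty]) (fun k hk => by simp at hk)
  simp only [List.length_nil, Int.natCast_zero, List.nil_append] at hA
  rw [hA]
  have hded : l.foldl PySem.Set.add [] = PySem.List.dedup l := by
    rw [PySem.List.dedup_eq_ofList, PySem.Set.ofList_eq_foldl]
  rw [hded]

-- ---------- B-side ----------
-- value at an index (all indices the algorithm produces are in [0, n))
def nsidVal (l : List Int) (i : Int) : Int := PySem.List.pyGetD l i 0

-- close the run-cutting state the way the trailing 'if current' does
def nsidFinish (st : List (List Int) × List Int) : List (List Int) :=
  if st.2.isEmpty then st.1 else st.1 ++ [st.2]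

-- Set.add/foldl bookkeeping for first-seen dedup
lemma foldl_add_all_eq (v : Int) (zs : List Int) (h : ∀ x ∈ zs, x = v) :
    zs.foldl PySem.Set.add [v] = [v] := by
  induction zs with
  | nil => rfl
  | cons z zs ih =>
    have hz : z = v := h z (List.mem_cons_self)
    subst hz
    rw [List.foldl_cons, setAdd_eq, if_pos (List.mem_singleton.mpr rfl)]
    exact ih (fun x hx => h x (List.mem_cons_of_mem _ hx))

lemma foldl_add_cons_notMem (v : Int) (zs : List Int) (h : v ∉ zs) :
    ∀ s : List Int, zs.foldl PySem.Set.add (v :: s) = v :: zs.foldl PySem.Set.add s := by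
  induction zs with
  | nil => intro s; rfl
  | cons z zs ih =>
    intro s
    have hzv : z ≠ v := fun hh => h (hh ▸ List.mem_cons_self)
    have hstep : PySem.Set.add (v :: s) z = v :: PySem.Set.add s z := by
      rw [setAdd_eq, setAdd_eq]
      by_cases hzs : z ∈ s
      · rw [if_pos (List.mem_cons_of_mem _ hzs), if_pos hzs]
      · rw [if_neg (by simp [hzv, hzs]), if_neg hzs]
        rfl
    rw [List.foldl_cons, List.foldl_cons, hstep,
        ih (fun hh => h (List.mem_cons_of_mem _ hh))]

-- dedup of a block of equal values followed by values ≠ v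
lemma dedup_const_append (v : Int) (xs zs : List Int) (hne : xs ≠ [])
    (hxs : ∀ x ∈ xs, x = v) (hzs : v ∉ zs) :
    PySem.List.dedup (xs ++ zs) = v :: PySem.List.dedup zs := by
  rw [PySem.List.dedup_eq_ofList, PySem.List.dedup_eq_ofList,
      PySem.Set.ofList_eq_foldl, PySem.Set.ofList_eq_foldl, List.foldl_append]
  have h1 : xs.foldl PySem.Set.add [] = [v] := by
    cases xs with
    | nil => exact absurd rfl hne
    | cons x xs =>
      have hx : x = v := hxs x (List.mem_cons_self)
      subst hx
      rw [List.foldl_cons, setAdd_eq, if_neg (List.not_mem_nil), List.nil_append]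
      exact foldl_add_all_eq x xs (fun y hy => hxs y (List.mem_cons_of_mem _ hy))
  rw [h1, foldl_add_cons_notMem v zs hzs []]

-- the run-cutting fold, characterized: one group per distinct value, in the
-- order the values first appear, each group = all positions of that value
lemma fold_group (l : List Int) (ys : List Int) :
    ∀ (gs : List (List Int)) (cur : List Int) (v : Int),
    cur ≠ [] → (∀ i ∈ cur, nsidVal l i = v) →
    (∀ j ∈ ys, v ≤ nsidVal l j) →
    ys.Pairwise (fun a b => nsidVal l a ≤ nsidVal l b) →
    nsidFinish (ys.foldl (nsidGroupStep l) (gs, cur))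
      = gs ++ (PySem.List.dedup ((cur ++ ys).map (nsidVal l))).map
                (fun w => (cur ++ ys).filter (fun i => nsidVal l i == w)) := by
  induction ys with
  | nil =>
    intro gs cur v hne hcur _ _
    have hded : PySem.List.dedup (cur.map (nsidVal l)) = [v] := by
      have := dedup_const_append v (cur.map (nsidVal l)) [] (by simpa using hne)
        (by intro x hx; rcases List.mem_map.mp hx with ⟨i, hi, hix⟩; exact hix ▸ hcur i hi)
        (List.not_mem_nil)
      simpa using this
    have hfil : cur.filter (fun i => nsidVal l i == v) = cur :=
      List.filter_eq_self.mpr (fun i hi => beq_iff_eq.mpr (hcur i hi))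
    cases cur with
    | nil => exact absurd rfl hne
    | cons c cs =>
      simp only [List.foldl_nil, nsidFinish, List.isEmpty_cons, List.append_nil] at *
      rw [hded]
      simp [hfil]
  | cons y ys ih =>
    intro gs cur v hne hcur hbound hpw
    have hvy : v ≤ nsidVal l y := hbound y List.mem_cons_self
    obtain ⟨c, cs, rfl⟩ : ∃ c cs, cur = c :: cs := by
      cases cur with
      | nil => exact absurd rfl hne
      | cons c cs => exact ⟨c, cs, rfl⟩
    have hc0 : PySem.List.pyGetD (c :: cs) 0 0 = c := PySem.List.pyGetD_zero_cons c cs 0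
    have hcv : nsidVal l c = v := hcur c List.mem_cons_self
    rw [List.foldl_cons]
    by_cases hv : nsidVal l y = v
    · have hstep : nsidGroupStep l (gs, c :: cs) y = (gs, (c :: cs) ++ [y]) := by
        unfold nsidGroupStep
        rw [if_pos]
        simp only [List.isEmpty_cons, Bool.not_false, Bool.true_and, hc0]
        exact beq_iff_eq.mpr (show nsidVal l c = nsidVal l y by rw [hcv, hv])
      rw [hstep, ih gs ((c :: cs) ++ [y]) v (by simp)
            (by intro i hi
                rcases List.mem_append.mp hi with h | h
                · exact hcur i h
                · exact (List.mem_singleton.mp h) ▸ hv)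
            (fun j hj => hbound j (List.mem_cons_of_mem _ hj))
            (List.Pairwise.of_cons hpw)]
      rw [List.append_assoc]
      rfl
    · have hvlt : v < nsidVal l y := lt_of_le_of_ne hvy (fun h => hv h.symm)
      have hstep : nsidGroupStep l (gs, c :: cs) y = (gs ++ [c :: cs], [y]) := by
        unfold nsidGroupStep
        rw [if_neg, if_neg (by simp)]
        simp only [List.isEmpty_cons, Bool.not_false, Bool.true_and, hc0]
        intro h
        have : nsidVal l c = nsidVal l y := beq_iff_eq.mp h
        exact hv (this ▸ hcv)
      have hylt : ∀ z ∈ y :: ys, v < nsidVal l z := by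
        intro z hz
        rcases List.mem_cons.mp hz with rfl | hz
        · exact hvlt
        · exact lt_of_lt_of_le hvlt (List.rel_of_pairwise_cons hpw hz)
      rw [hstep, ih (gs ++ [c :: cs]) [y] (nsidVal l y) (by simp)
            (by intro i hi; rw [List.mem_singleton.mp hi])
            (fun j hj => List.rel_of_pairwise_cons hpw hj)
            (List.Pairwise.of_cons hpw)]
      have hded : PySem.List.dedup (((c :: cs) ++ y :: ys).map (nsidVal l))
          = v :: PySem.List.dedup ((y :: ys).map (nsidVal l)) := by
        rw [List.map_append]
        refine dedup_const_append v _ _ (by simp) ?_ ?_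
        · intro x hx; rcases List.mem_map.mp hx with ⟨i, hi, hix⟩; exact hix ▸ hcur i hi
        · intro hvmem
          rcases List.mem_map.mp hvmem with ⟨z, hz, hzv⟩
          exact absurd hzv (ne_of_gt (hylt z hz))
      have hfilv : ((c :: cs) ++ y :: ys).filter (fun i => nsidVal l i == v) = c :: cs := by
        rw [List.filter_append,
            List.filter_eq_self.mpr (fun i hi => beq_iff_eq.mpr (hcur i hi)),
            List.filter_eq_nil_iff.mpr
              (fun z hz => by simpa using ne_of_gt (hylt z hz)), List.append_nil]
      have hfilw : ∀ w ∈ PySem.List.dedup ((y :: ys).map (nsidVal l)),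
          ((c :: cs) ++ y :: ys).filter (fun i => nsidVal l i == w)
            = (y :: ys).filter (fun i => nsidVal l i == w) := by
        intro w hw
        have hvw : v < w := by
          rcases List.mem_map.mp ((PySem.List.mem_dedup _ _).mp hw) with ⟨z, hz, rfl⟩
          exact hylt z hz
        rw [List.filter_append, List.filter_eq_nil_iff.mpr
              (fun i hi => by
                simp only [beq_iff_eq]
                exact fun h => (ne_of_lt hvw) ((hcur i hi).symm.trans h)),
            List.nil_append]
      rw [hded, List.map_cons, hfilv, List.map_congr_left hfilw]
      simp

-- dedup lists values in increasing order of first occurrence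
lemma dedup_firstocc_pairwise (l : List Int) :
    (PySem.List.dedup l).Pairwise (fun v w => List.idxOf v l < List.idxOf w l) := by
  induction l using List.reverseRecOn with
  | nil =>
    have : PySem.List.dedup ([] : List Int) = [] := by
      rw [PySem.List.dedup_eq_ofList, PySem.Set.ofList_eq_foldl]; rfl
    rw [this]; exact List.Pairwise.nil
  | append_singleton l y ih =>
    have hded : PySem.List.dedup (l ++ [y])
        = if y ∈ l then PySem.List.dedup l else PySem.List.dedup l ++ [y] := by
      rw [PySem.List.dedup_eq_ofList, PySem.Set.ofList_eq_foldl, List.foldl_append,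
          List.foldl_cons, List.foldl_nil, ← PySem.Set.ofList_eq_foldl,
          ← PySem.List.dedup_eq_ofList, setAdd_eq]
      simp only [PySem.List.mem_dedup]
    by_cases hy : y ∈ l
    · rw [hded, if_pos hy]
      refine ih.imp_of_mem ?_
      intro a b ha hb hab
      have ha' := (PySem.List.mem_dedup l a).mp ha
      have hb' := (PySem.List.mem_dedup l b).mp hb
      rwa [List.idxOf_append_of_mem ha', List.idxOf_append_of_mem hb']
    · rw [hded, if_neg hy, List.pairwise_append]
      refine ⟨?_, List.pairwise_singleton _ _, ?_⟩
      · refine ih.imp_of_mem ?_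
        intro a b ha hb hab
        have ha' := (PySem.List.mem_dedup l a).mp ha
        have hb' := (PySem.List.mem_dedup l b).mp hb
        rwa [List.idxOf_append_of_mem ha', List.idxOf_append_of_mem hb']
      · intro a ha b hb
        have ha' := (PySem.List.mem_dedup l a).mp ha
        rw [List.mem_singleton.mp hb, List.idxOf_append_of_mem ha',
            List.idxOf_append, if_neg hy]
        have h1 : List.idxOf a l < l.length := List.idxOf_lt_length_of_mem ha'
        omega

-- a position holding v is at or after the first occurrence of v
lemma idxOf_le_of_getElem (l : List Int) (v : Int) :
    ∀ (k : Nat) (hk : k < l.length), l[k] = v → List.idxOf v l ≤ k := by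
  induction l with
  | nil => intro k hk; simp at hk
  | cons x xs ih =>
    intro k hk hkv
    by_cases hxv : x = v
    · subst hxv; simp
    · cases k with
      | zero => exact absurd hkv hxv
      | succ k =>
        rw [List.idxOf_cons]
        simp only [beq_eq_false_iff_ne.mpr hxv, cond_false]
        exact Nat.succ_le_succ (ih k (by simpa using hk) (by simpa using hkv))

-- the smallest position of a value is its first occurrence
lemma min_filter_eq_idxOf (l : List Int) (order : List Int)
    (hperm : order.Perm (PySem.List.pyRange 0 (l.length : Int) 1)) (v : Int) (hv : v ∈ l) :
    PySem.List.min? (order.filter (fun i => nsidVal l i == v)) (fun x => x)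
      = some ((List.idxOf v l : Nat) : Int) := by
  have hlen : List.idxOf v l < l.length := List.idxOf_lt_length_of_mem hv
  have hval : ∀ (k : Nat) (hk : k < l.length), nsidVal l (k : Int) = l[k]'hk := by
    intro k hk
    show PySem.List.pyGetD l (k : Int) 0 = l[k]'hk
    rw [PySem.List.pyGetD_natCast, List.getD_eq_getElem _ _ hk]
  have hmemg : ((List.idxOf v l : Nat) : Int)
      ∈ order.filter (fun i => nsidVal l i == v) := by
    rw [List.mem_filter]
    refine ⟨?_, ?_⟩
    · rw [hperm.mem_iff, PySem.List.mem_pyRange_one]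
      exact ⟨Int.natCast_nonneg _, by exact_mod_cast hlen⟩
    · refine beq_iff_eq.mpr ((hval _ hlen).trans ?_)
      exact List.getElem_idxOf hlen
  obtain ⟨m, hm⟩ : ∃ m, PySem.List.min?
      (order.filter (fun i => nsidVal l i == v)) (fun x => x) = some m := by
    rcases h : PySem.List.min? (order.filter (fun i => nsidVal l i == v)) (fun x => x)
      with _ | m
    · rw [PySem.List.min?_eq_none_iff] at h
      exact absurd (h ▸ hmemg) List.not_mem_nil
    · exact ⟨m, rfl⟩
  have h1 : m ≤ ((List.idxOf v l : Nat) : Int) :=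
    PySem.List.min?_isMin hm _ hmemg
  have h2 : ((List.idxOf v l : Nat) : Int) ≤ m := by
    have hmem := PySem.List.min?_mem hm
    rw [List.mem_filter] at hmem
    obtain ⟨hmo, hmv⟩ := hmem
    rw [hperm.mem_iff, PySem.List.mem_pyRange_one] at hmo
    obtain ⟨hm0, hmn⟩ := hmo
    have hmt : m.toNat < l.length := by omega
    have : l[m.toNat] = v := by
      rw [← hval m.toNat hmt]
      have : ((m.toNat : Nat) : Int) = m := by omega
      rw [this]
      exact beq_iff_eq.mp hmv
    have := idxOf_le_of_getElem l v m.toNat hmt this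
    omega
  rw [hm, le_antisymm h1 h2]

-- the inner scatter loop: write r at every listed (nonnegative) position
lemma write_all (r : Int) (js : List Int) (hjs : ∀ j ∈ js, 0 ≤ j) :
    ∀ out : List Int,
    (js.foldl (fun out j => PySem.List.pySetD out j r) out).length = out.length ∧
    ∀ k (hk : k < out.length),
      (js.foldl (fun out j => PySem.List.pySetD out j r) out)[k]?
        = some (if (k : Int) ∈ js then r else out[k]) := by
  induction js with
  | nil =>
    intro out
    exact ⟨rfl, fun k hk => by simp [List.getElem?_eq_getElem hk]⟩
  | cons j js ih =>
    intro out
    have hj0 : 0 ≤ j := hjs j List.mem_cons_self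
    have hset : PySem.List.pySetD out j r = out.set j.toNat r :=
      PySem.List.pySetD_of_nonneg out r hj0
    have hlen : (out.set j.toNat r).length = out.length := List.length_set
    obtain ⟨ihlen, ihget⟩ := ih (fun x hx => hjs x (List.mem_cons_of_mem _ hx))
      (out.set j.toNat r)
    rw [List.foldl_cons, hset]
    refine ⟨ihlen.trans hlen, ?_⟩
    intro k hk
    rw [ihget k (by omega)]
    by_cases hmem : (k : Int) ∈ js
    · rw [if_pos hmem, if_pos (List.mem_cons_of_mem _ hmem)]
    · have hgs : (out.set j.toNat r)[k]'(by omega)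
          = if (k : Int) = j then r else out[k] := by
        rw [List.getElem_set]
        by_cases hkj : (k : Int) = j
        · rw [if_pos (by omega), if_pos hkj]
        · rw [if_neg (by omega), if_neg hkj]
      rw [hgs]
      by_cases hkj : (k : Int) = j
      · simp [hkj]
      · have : (k : Int) ∉ j :: js := by
          intro h
          rcases List.mem_cons.mp h with h | h
          · exact hkj h
          · exact hmem h
        simp [hmem, hkj, this]

-- nsidVal at an in-range natural index is the list entry
lemma nsidVal_natCast (l : List Int) (k : Nat) (hk : k < l.length) :
    nsidVal l (k : Int) = l[k] := by
  show PySem.List.pyGetD l (k : Int) 0 = l[k]'hk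
  rw [PySem.List.pyGetD_natCast, List.getD_eq_getElem _ _ hk]

-- the outer scatter loop: group r gets rank s + r at all its positions
lemma scatter_lemma (l : List Int) (order : List Int)
    (hperm : order.Perm (PySem.List.pyRange 0 (l.length : Int) 1)) (vs : List Int) :
    ∀ (s : Int) (out : List Int) (_ : vs.Nodup) (hlen : out.length = l.length),
    ((PySem.List.enumerate
        (vs.map (fun v => order.filter (fun i => nsidVal l i == v))) s).foldl
        (fun out p => p.2.foldl (fun out j => PySem.List.pySetD out j p.1) out)
        out).length = l.length ∧
    ∀ k (hk : k < l.length),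
      ((PySem.List.enumerate
          (vs.map (fun v => order.filter (fun i => nsidVal l i == v))) s).foldl
          (fun out p => p.2.foldl (fun out j => PySem.List.pySetD out j p.1) out)
          out)[k]?
        = some (if _ : l[k] ∈ vs then s + (List.idxOf l[k] vs : Int) else out[k]'(by omega)) := by
  induction vs with
  | nil =>
    intro s out _ hlen
    refine ⟨by simpa [PySem.List.enumerate_nil] using hlen, ?_⟩
    intro k hk
    simp [PySem.List.enumerate_nil, List.getElem?_eq_getElem (show k < out.length by omega)]
  | cons v vs ih =>
    intro s out hnd hlen
    have hjs : ∀ j ∈ order.filter (fun i => nsidVal l i == v), 0 ≤ j := by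
      intro j hj
      have := (List.mem_filter.mp hj).1
      rw [hperm.mem_iff, PySem.List.mem_pyRange_one] at this
      exact this.1
    obtain ⟨wlen, wget⟩ := write_all s (order.filter (fun i => nsidVal l i == v)) hjs out
    rw [List.map_cons, PySem.List.enumerate_cons, List.foldl_cons]
    obtain ⟨ihlen, ihget⟩ := ih (s + 1)
      ((order.filter (fun i => nsidVal l i == v)).foldl
        (fun out j => PySem.List.pySetD out j s) out)
      (List.nodup_cons.mp hnd).2 (wlen.trans hlen)
    refine ⟨ihlen, ?_⟩
    intro k hk
    rw [ihget k hk]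
    have hvvs : v ∉ vs := (List.nodup_cons.mp hnd).1
    have hkout : k < out.length := by omega
    have hmemg : (k : Int) ∈ order.filter (fun i => nsidVal l i == v) ↔ l[k] = v := by
      rw [List.mem_filter, hperm.mem_iff, PySem.List.mem_pyRange_one]
      constructor
      · intro ⟨_, h⟩
        rw [← nsidVal_natCast l k hk]
        exact beq_iff_eq.mp h
      · intro h
        exact ⟨⟨Int.natCast_nonneg _, by exact_mod_cast hk⟩,
          beq_iff_eq.mpr ((nsidVal_natCast l k hk).trans h)⟩
    have hwk : ((order.filter (fun i => nsidVal l i == v)).foldl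
        (fun out j => PySem.List.pySetD out j s) out)[k]'(by omega)
        = if (k : Int) ∈ order.filter (fun i => nsidVal l i == v) then s else out[k]'hkout := by
      have := wget k hkout
      rw [List.getElem?_eq_getElem (show k < _ by omega)] at this
      exact Option.some.inj this
    by_cases hv : l[k] = v
    · have hnvs : l[k] ∉ vs := hv ▸ hvvs
      rw [dif_neg hnvs, hwk, if_pos (hmemg.mpr hv), dif_pos (List.mem_cons.mpr (Or.inl hv))]
      rw [hv, List.idxOf_cons_self]
      simp
    · by_cases hvs : l[k] ∈ vs
      · rw [dif_pos hvs, dif_pos (List.mem_cons.mpr (Or.inr hvs))]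
        rw [List.idxOf_cons_ne _ (fun h => hv h.symm)]
        push_cast
        ring_nf
      · rw [dif_neg hvs, dif_neg (by
          intro h
          rcases List.mem_cons.mp h with h | h
          · exact hv h
          · exact hvs h), hwk, if_neg (fun h => hv (hmemg.mp h))]

lemma sideB (l : List Int) :
    normalize_session_id_list_alt l
      = l.map (fun s => ((List.idxOf s (PySem.List.dedup l) : Nat) : Int)) := by
  cases hl : l with
  | nil => rfl
  | cons x xs =>
  rw [← hl]
  have hlpos : 0 < l.length := by rw [hl]; simp
  simp only [normalize_session_id_list_alt]
  set order := PySem.List.sorted (PySem.List.pyRange 0 (l.length : Int) 1)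
      (fun i => PySem.List.pyGetD l i 0) false with horder
  have hperm : order.Perm (PySem.List.pyRange 0 (l.length : Int) 1) :=
    PySem.List.sorted_perm _ _ _
  have hpw : order.Pairwise (fun a b => nsidVal l a ≤ nsidVal l b) :=
    PySem.List.sorted_pairwise _ _
  obtain ⟨i, rest, hor⟩ : ∃ i rest, order = i :: rest := by
    cases ho : order with
    | nil =>
      exfalso
      have := hperm.length_eq
      rw [ho, PySem.List.length_pyRange_one] at this
      simp at this
      omega
    | cons i rest => exact ⟨i, rest, rfl⟩
  -- the run-cutting fold produces one group per distinct value
  have h1 : nsidFinish (order.foldl (nsidGroupStep l) ([], []))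
      = (PySem.List.dedup (order.map (nsidVal l))).map
          (fun w => order.filter (fun i => nsidVal l i == w)) := by
    rw [hor, List.foldl_cons]
    have hstep0 : nsidGroupStep l ([], []) i = ([], [i]) := rfl
    rw [hstep0]
    have hpw' : List.Pairwise (fun a b => nsidVal l a ≤ nsidVal l b) (i :: rest) :=
      hor ▸ hpw
    have := fold_group l rest [] [i] (nsidVal l i) (by simp)
      (by intro j hj; rw [List.mem_singleton.mp hj])
      (fun j hj => List.rel_of_pairwise_cons hpw' hj)
      (List.Pairwise.of_cons hpw')
    simpa using this
  -- the values, in first-occurrence order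
  have h2 : (order.map (nsidVal l)).Perm l := by
    have hmapeq : (PySem.List.pyRange 0 (l.length : Int) 1).map (nsidVal l) = l :=
      PySem.List.map_pyGetD_pyRange_zero' l 0
    have := hperm.map (nsidVal l)
    rwa [hmapeq] at this
  have h3 : (PySem.List.dedup (order.map (nsidVal l))).Perm (PySem.List.dedup l) := by
    rw [List.perm_ext_iff_of_nodup (PySem.List.nodup_dedup _) (PySem.List.nodup_dedup _)]
    intro a
    rw [PySem.List.mem_dedup, PySem.List.mem_dedup, h2.mem_iff]
  -- sorting the groups by smallest position lists them in first-occurrence order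
  have h4 : PySem.List.sorted
      (nsidFinish (order.foldl (nsidGroupStep l) ([], [])))
      (fun g => (PySem.List.min? g (fun x => x)).getD 0) false
      = (PySem.List.dedup l).map (fun w => order.filter (fun i => nsidVal l i == w)) := by
    refine PySem.List.sorted_eq_of_perm_of_pairwise_lt _ _ _ ?_ ?_
    · rw [h1]
      exact h3.symm.map _
    · rw [List.pairwise_map]
      refine (dedup_firstocc_pairwise l).imp_of_mem ?_
      intro a b ha hb hab
      have ha' := (PySem.List.mem_dedup l a).mp ha
      have hb' := (PySem.List.mem_dedup l b).mp hb
      rw [min_filter_eq_idxOf l order hperm a ha', min_filter_eq_idxOf l order hperm b hb']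
      simpa using hab
  unfold nsidFinish at h4
  rw [h4]
  -- scatter each group's rank
  have hout0 : (PySem.List.pyRepeat ([0] : List Int) (l.length : Int)).length
      = l.length := by
    rw [PySem.List.pyRepeat_singleton]
    simp
  obtain ⟨hrlen, hrget⟩ := scatter_lemma l order hperm (PySem.List.dedup l) 0
    (PySem.List.pyRepeat ([0] : List Int) (l.length : Int))
    (PySem.List.nodup_dedup l) hout0
  apply List.ext_getElem?
  intro k
  by_cases hk : k < l.length
  · rw [hrget k hk]
    have hmem : l[k] ∈ PySem.List.dedup l :=
      (PySem.List.mem_dedup l _).mpr (List.getElem_mem hk)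
    rw [dif_pos hmem, List.getElem?_map, List.getElem?_eq_getElem hk]
    simp
  · rw [List.getElem?_eq_none (by rw [hrlen]; omega),
        List.getElem?_eq_none (by rw [List.length_map]; omega)]

-- ===== VERDICT (by name: the statement is the Claim_ definition above) =====
theorem normalize_session_id_list_spec : Claim_equal_normalize_session_id_list := by
  intro l _
  unfold Spec_normalize_session_id_list
  rw [sideA, sideB]
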